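-- pv_equiv track=rewrite | github.com/cdxw46/challenges | smurf/rtp/codecs.py | _linear_to_ulaw_byte
-- ===== SOURCE A (Python) =====
-- _BIAS = 0x84
--
-- _CLIP = 32635
--
-- def _linear_to_ulaw_byte(sample: int) -> int:
--     sign = 0
--     if sample < 0:
--         sample = -sample
--         sign = 0x80
--     if sample > _CLIP:
--         sample = _CLIP
--     sample += _BIAS
--     exp = 7
--     expmask = 0x4000
--     while not (sample & expmask) and exp > 0:
--         exp -= 1
--         expmask >>= 1
--     mantissa = (sample >> (exp + 3)) & 0x0F
--     ulaw = ~(sign | (exp << 4) | mantissa) & 0xFF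
--     return ulaw
-- ===== SOURCE B (Python) =====
-- _BIAS = 0x84
--
-- _CLIP = 32635
--
-- def _linear_to_ulaw_byte(sample: int) -> int:
--     sign = 0x80 if sample < 0 else 0
--     mag = min(abs(sample), _CLIP) + _BIAS
--     exp = mag.bit_length() - 8  # biased magnitude is positive, so this is the top-set-bit exponent
--     mantissa = (mag >> (exp + 3)) & 0x0F
--     return ~(sign | (exp << 4) | mantissa) & 0xFF
-- ===== Notes on version B (the rewrite author's own statement) =====
-- stated objective: simpler
-- what changed: Replaced the expmask while-loop that scans down for the top set bit with a closed-form exponent computed from the biased magnitude's bit_length(), and folded the sign/clip branches into a sign flag plus min(abs(sample), _CLIP).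
import Mathlib
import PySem

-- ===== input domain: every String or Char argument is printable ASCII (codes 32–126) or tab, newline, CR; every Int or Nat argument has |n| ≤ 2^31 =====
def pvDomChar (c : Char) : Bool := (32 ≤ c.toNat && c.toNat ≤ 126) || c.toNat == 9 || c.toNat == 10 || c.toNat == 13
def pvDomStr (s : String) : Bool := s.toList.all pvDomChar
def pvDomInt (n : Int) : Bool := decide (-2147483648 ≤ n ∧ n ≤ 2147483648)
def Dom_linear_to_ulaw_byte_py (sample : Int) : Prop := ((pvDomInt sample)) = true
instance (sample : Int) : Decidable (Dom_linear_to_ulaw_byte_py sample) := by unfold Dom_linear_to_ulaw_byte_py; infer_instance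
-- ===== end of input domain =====

-- B replaces A's expmask bit-scan while-loop with a closed-form exponent from the biased
-- magnitude's bit_length (objective: simpler); same return value on every int, proved below.

-- ===== PORT A =====
-- the while-loop: Python's exp counts 7,6,…; state is (exp, expmask); returns the final exp
def pvALoop (sample : Int) : Nat → Int → Nat
  | 0, _ => 0
  | e+1, mask => if PySem.Int.band sample mask = 0 then pvALoop sample e (mask >>> (1 : Nat)) else e+1

def linear_to_ulaw_byte_py (sample : Int) : Int :=
  let sign : Int := if sample < 0 then 0x80 else 0
  let s1 : Int := if sample < 0 then -sample else sample
  let s2 : Int := if s1 > 32635 then 32635 else s1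
  let s3 : Int := s2 + 0x84
  let exp : Nat := pvALoop s3 7 0x4000
  let mantissa : Int := PySem.Int.band (s3 >>> (exp + 3)) 0x0F
  PySem.Int.band (Int.not (PySem.Int.bor (PySem.Int.bor sign ((exp : Int) <<< (4 : Nat))) mantissa)) 0xFF

-- ===== PORT B =====
def linear_to_ulaw_byte_py_alt (sample : Int) : Int :=
  let sign : Int := if sample < 0 then 0x80 else 0
  let mag : Int := min (if sample < 0 then -sample else sample) 32635 + 0x84
  let exp : Int := (PySem.Int.bitLength mag : Int) - 8
  -- mag ≥ 132 so exp ≥ 0: the shift amounts are the same naturals Python shifts by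
  let mantissa : Int := PySem.Int.band (mag >>> (exp + 3).toNat) 0x0F
  PySem.Int.band (Int.not (PySem.Int.bor (PySem.Int.bor sign (exp <<< (4 : Nat))) mantissa)) 0xFF

-- ===== PRECONDITION & SPEC =====
def Spec_linear_to_ulaw_byte_py (sample : Int) (out : Int) : Prop := out = linear_to_ulaw_byte_py_alt sample
instance (sample : Int) (out : Int) : Decidable (Spec_linear_to_ulaw_byte_py sample out) := by unfold Spec_linear_to_ulaw_byte_py; infer_instance

-- ===== CLAIM (what is proved, stated in full; the proofs are below) =====
def Claim_equal_linear_to_ulaw_byte_py : Prop := ∀ (sample : Int), Dom_linear_to_ulaw_byte_py sample → Spec_linear_to_ulaw_byte_py sample (linear_to_ulaw_byte_py sample)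

-- ===== LEMMAS AND PROOFS =====

theorem pv_band_two_pow_zero (k m : Nat) (h : m < 2 ^ k) :
    PySem.Int.band (m : Int) ((2 ^ k : Nat) : Int) = 0 := by
  rw [PySem.Int.band_natCast]
  norm_num [Nat.and_two_pow, Nat.testBit_eq_false_of_lt h]

theorem pv_band_two_pow_pos (k m : Nat) (h1 : 2 ^ k ≤ m) (h2 : m < 2 ^ (k + 1)) :
    PySem.Int.band (m : Int) ((2 ^ k : Nat) : Int) ≠ 0 := by
  rw [PySem.Int.band_natCast]
  norm_num [Nat.and_two_pow, Nat.testBit_of_two_pow_le_and_two_pow_add_one_gt h1 h2]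

theorem pv_bitLength_eq (k m : Nat) (h1 : 2 ^ k ≤ m) (h2 : m < 2 ^ (k + 1)) :
    PySem.Int.bitLength (m : Int) = k + 1 := by
  have hm : (m : Int) ≠ 0 := by
    have := Nat.pow_pos (show 0 < 2 by norm_num) (n := k)
    omega
  have hlt := PySem.Int.lt_two_pow_bitLength (m : Int)
  have hle := PySem.Int.two_pow_bitLength_le (m : Int) hm
  rw [Int.natAbs_natCast] at hlt hle
  set bl := PySem.Int.bitLength (m : Int) with hbl
  have h3 : k < bl := by
    by_contra h
    push Not at h
    have := Nat.pow_le_pow_right (show 1 ≤ 2 by norm_num) h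
    omega
  have h4 : bl - 1 ≤ k := by
    by_contra h
    push Not at h
    have : k + 1 ≤ bl - 1 := by omega
    have := Nat.pow_le_pow_right (show 1 ≤ 2 by norm_num) this
    omega
  omega

theorem pv_bitLength_ge (m : Nat) (h : 128 ≤ m) : 8 ≤ PySem.Int.bitLength (m : Int) := by
  have hlt := PySem.Int.lt_two_pow_bitLength (m : Int)
  rw [Int.natAbs_natCast] at hlt
  by_contra h8
  push Not at h8
  have : PySem.Int.bitLength (m : Int) ≤ 7 := by omega
  have := Nat.pow_le_pow_right (show 1 ≤ 2 by norm_num) this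
  omega

theorem pvALoop_succ (s : Int) (e : Nat) (mask : Int) :
    pvALoop s (e + 1) mask = if PySem.Int.band s mask = 0 then pvALoop s e (mask >>> (1 : Nat)) else e + 1 := rfl

theorem pv_loop_general (v : Nat) (m : Nat) (h1 : 128 ≤ m) (h2 : m < 2 ^ (v + 8)) :
    pvALoop (m : Int) v ((2 ^ (v + 7) : Nat) : Int) = PySem.Int.bitLength (m : Int) - 8 := by
  induction v with
  | zero =>
    have hb := pv_bitLength_eq 7 m (by norm_num; omega) (by norm_num at h2 ⊢; omega)
    rw [hb]
    simp [pvALoop]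
  | succ v ih =>
    rw [pvALoop_succ]
    by_cases hc : m < 2 ^ (v + 8)
    · rw [if_pos (pv_band_two_pow_zero (v + 8) m hc)]
      have hshift : (((2 ^ (v + 1 + 7) : Nat) : Int) >>> (1 : Nat)) = ((2 ^ (v + 7) : Nat) : Int) := by
        rw [Int.shiftRight_eq_div_pow]
        rw [show v + 1 + 7 = (v + 7) + 1 from by omega, pow_succ]
        push_cast
        rw [mul_comm]
        norm_num
      rw [hshift]
      exact ih hc
    · push Not at hc
      rw [if_neg (by
        have := pv_band_two_pow_pos (v + 8) m hc (by omega)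
        simpa [show v + 1 + 7 = v + 8 from by omega] using this)]
      have hb := pv_bitLength_eq (v + 8) m hc (by omega)
      omega

theorem pv_core_eq (sign mag : Int) (h0 : 0 ≤ mag) (h1 : mag ≤ 32635) :
    PySem.Int.band (Int.not (PySem.Int.bor (PySem.Int.bor sign
        ((pvALoop (mag + 132) 7 16384 : Int) <<< (4 : Nat)))
        (PySem.Int.band ((mag + 132) >>> (pvALoop (mag + 132) 7 16384 + 3)) 15))) 255
    = PySem.Int.band (Int.not (PySem.Int.bor (PySem.Int.bor sign
        (((PySem.Int.bitLength (mag + 132) : Int) - 8) <<< (4 : Nat)))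
        (PySem.Int.band ((mag + 132) >>> (((PySem.Int.bitLength (mag + 132) : Int) - 8 + 3)).toNat) 15))) 255 := by
  obtain ⟨m, hm⟩ : ∃ m : Nat, mag + 132 = (m : Int) := ⟨(mag + 132).toNat, by omega⟩
  have hmlo : 128 ≤ m := by omega
  have hmhi : m < 2 ^ (7 + 8) := by norm_num; omega
  have hloop : pvALoop (m : Int) 7 ((2 ^ 14 : Nat) : Int) = PySem.Int.bitLength (m : Int) - 8 :=
    pv_loop_general 7 m hmlo hmhi
  have hbl := pv_bitLength_ge m hmlo
  rw [hm, show (16384 : Int) = ((2 ^ 14 : Nat) : Int) from by norm_num, hloop]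
  have hc1 : ((PySem.Int.bitLength (m : Int) - 8 : Nat) : Int) = (PySem.Int.bitLength (m : Int) : Int) - 8 := by omega
  have hc2 : ((PySem.Int.bitLength (m : Int) : Int) - 8 + 3).toNat = PySem.Int.bitLength (m : Int) - 8 + 3 := by omega
  rw [hc1, hc2]

-- ===== VERDICT (by name: the statement is the Claim_ definition above) =====
theorem linear_to_ulaw_byte_py_spec : Claim_equal_linear_to_ulaw_byte_py := by
  intro sample _
  unfold Spec_linear_to_ulaw_byte_py linear_to_ulaw_byte_py linear_to_ulaw_byte_py_alt
  simp only []
  set s1 : Int := if sample < 0 then -sample else sample with hs1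
  have hs1nn : 0 ≤ s1 := by rw [hs1]; split <;> omega
  have hclip : (if s1 > 32635 then (32635 : Int) else s1) = min s1 32635 := by
    split <;> omega
  rw [hclip]
  exact pv_core_eq _ (min s1 32635) (by omega) (by omega)
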